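-- pv_equiv track=rewrite | github.com/KESABA-BARIK/cloudgaurd | routes/config_routes.py | _group_by_environment
-- ===== SOURCE A (Python) =====
-- def _group_by_environment(configs):
--     """Group configs by environment."""
--     groups = {}
--
--     for cfg in configs:
--         env = cfg.get('environment', 'unknown')
--         if env not in groups:
--             groups[env] = {'count': 0, 'critical': 0}
--
--         groups[env]['count'] += 1
--         if cfg.get('risk_level') == 'CRITICAL':
--             groups[env]['critical'] += 1
--
--     return groups
-- ===== SOURCE B (Python) =====
-- def _group_by_environment(configs):
--     """Group configs by environment: two flat tallies, then one merge pass."""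
--     total = {}
--     for cfg in configs:
--         env = cfg.get('environment', 'unknown')
--         total[env] = total.get(env, 0) + 1
--
--     critical = {}
--     for cfg in configs:
--         if cfg.get('risk_level') == 'CRITICAL':
--             env = cfg.get('environment', 'unknown')
--             critical[env] = critical.get(env, 0) + 1
--
--     return {env: {'count': cnt, 'critical': critical.get(env, 0)}
--             for env, cnt in total.items()}
-- ===== Notes on version B (the rewrite author's own statement) =====
-- stated objective: alternative
-- what changed: Replaces A's single fused pass that mutates nested per-environment dicts with two independent flat tallies (total and critical counts) built in separate passes, merged by a final dict comprehension in first-appearance order.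
import Mathlib
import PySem

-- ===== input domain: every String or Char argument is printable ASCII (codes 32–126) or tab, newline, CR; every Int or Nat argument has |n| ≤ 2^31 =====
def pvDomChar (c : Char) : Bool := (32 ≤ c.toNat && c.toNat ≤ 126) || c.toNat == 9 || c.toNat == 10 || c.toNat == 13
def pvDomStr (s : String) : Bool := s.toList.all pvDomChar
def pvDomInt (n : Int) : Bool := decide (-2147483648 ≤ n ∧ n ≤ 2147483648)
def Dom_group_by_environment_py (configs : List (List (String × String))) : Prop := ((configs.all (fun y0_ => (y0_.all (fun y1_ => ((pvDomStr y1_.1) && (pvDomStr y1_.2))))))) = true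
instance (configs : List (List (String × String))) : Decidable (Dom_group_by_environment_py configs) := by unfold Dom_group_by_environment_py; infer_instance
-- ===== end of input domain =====

-- B replaces A's fused pass over nested dicts with two flat count passes plus a merge (alternative decomposition, same cost).

-- ===== PORT A =====
-- A's loop body: conditional initialisation, then the in-place `+=` updates, as Dict.modify.
def pvAStep (groups : PySem.Dict String (PySem.Dict String Int)) (cfg : List (String × String)) :
    PySem.Dict String (PySem.Dict String Int) :=
  let env := (cfg.lookup "environment").getD "unknown"
  let g1 := if groups.contains env then groups
            else groups.insert env (PySem.Dict.mk [("count", 0), ("critical", 0)])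
  let g2 := g1.modify env (PySem.Dict.mk []) (fun d => d.modify "count" 0 (· + 1))
  if cfg.lookup "risk_level" == some "CRITICAL" then
    g2.modify env (PySem.Dict.mk []) (fun d => d.modify "critical" 0 (· + 1))
  else g2

def group_by_environment_py (configs : List (List (String × String))) : List (String × List (String × Int)) :=
  ((configs.foldl pvAStep (PySem.Dict.mk [])).items).map (fun p => (p.1, p.2.items))

-- ===== PORT B =====
-- first pass: total tally per environment
def pvTotalStep (d : PySem.Dict String Int) (cfg : List (String × String)) : PySem.Dict String Int :=
  let env := (cfg.lookup "environment").getD "unknown"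
  d.insert env (d.getD env 0 + 1)

-- second pass: critical tally per environment
def pvCritStep (d : PySem.Dict String Int) (cfg : List (String × String)) : PySem.Dict String Int :=
  if cfg.lookup "risk_level" == some "CRITICAL" then
    let env := (cfg.lookup "environment").getD "unknown"
    d.insert env (d.getD env 0 + 1)
  else d

def group_by_environment_py_alt (configs : List (List (String × String))) : List (String × List (String × Int)) :=
  let total := configs.foldl pvTotalStep (PySem.Dict.mk [])
  let critical := configs.foldl pvCritStep (PySem.Dict.mk [])
  total.items.map (fun p => (p.1, [("count", p.2), ("critical", critical.getD p.1 0)]))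

-- ===== PRECONDITION & SPEC =====
def Spec_group_by_environment_py (configs : List (List (String × String))) (out : List (String × List (String × Int))) : Prop := out = group_by_environment_py_alt configs
instance (configs : List (List (String × String))) (out : List (String × List (String × Int))) : Decidable (Spec_group_by_environment_py configs out) := by unfold Spec_group_by_environment_py; infer_instance

-- ===== CLAIM (what is proved, stated in full; the proofs are below) =====
def Claim_equal_group_by_environment_py : Prop := ∀ (configs : List (List (String × String))), Dom_group_by_environment_py configs → Spec_group_by_environment_py configs (group_by_environment_py configs)

-- ===== LEMMAS AND PROOFS =====

-- A's state, expressed through B's two tallies: each environment key of the total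
-- tally carries the inner dict built from the two counts.
def pvMerge (t c : PySem.Dict String Int) : PySem.Dict String (PySem.Dict String Int) :=
  PySem.Dict.mk (t.items.map (fun p => (p.1, PySem.Dict.mk [("count", p.2), ("critical", c.getD p.1 0)])))

lemma pvContains_merge (t c : PySem.Dict String Int) (e : String) :
    (pvMerge t c).contains e = t.contains e := by
  simp only [pvMerge, PySem.Dict.contains, List.any_map]
  rfl

lemma pvGet?_merge (t c : PySem.Dict String Int) (e : String) :
    (pvMerge t c).get? e =
      (t.get? e).map (fun n => PySem.Dict.mk [("count", n), ("critical", c.getD e 0)]) := by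
  simp only [pvMerge, PySem.Dict.get?, List.find?_map]
  have hc : ((fun (p : String × PySem.Dict String Int) => p.1 == e) ∘
      (fun (p : String × Int) => (p.1, PySem.Dict.mk [("count", p.2), ("critical", c.getD p.1 0)])))
      = (fun (p : String × Int) => p.1 == e) := rfl
  rw [hc]
  cases hf : t.items.find? (fun p => p.1 == e) with
  | none => simp
  | some p =>
    have hpe : p.1 = e := by have := List.find?_some hf; simpa using this
    simp [hpe]

lemma pvInner_count (n m : Int) :
    (PySem.Dict.mk [("count", n), ("critical", m)]).insert "count"
        ((PySem.Dict.mk [("count", n), ("critical", m)]).getD "count" 0 + 1)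
      = PySem.Dict.mk [("count", n + 1), ("critical", m)] := rfl

lemma pvInner_crit (n m : Int) :
    (PySem.Dict.mk [("count", n), ("critical", m)]).insert "critical"
        ((PySem.Dict.mk [("count", n), ("critical", m)]).getD "critical" 0 + 1)
      = PySem.Dict.mk [("count", n), ("critical", m + 1)] := rfl

lemma pvGetD_merge (t c : PySem.Dict String Int) (e : String) (n : Int)
    (hg : t.get? e = some n) :
    (pvMerge t c).getD e (PySem.Dict.mk []) =
      PySem.Dict.mk [("count", n), ("critical", c.getD e 0)] := by
  rw [PySem.Dict.getD_eq_get?_getD, pvGet?_merge, hg]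
  rfl

lemma pvGet?_of_contains (t : PySem.Dict String Int) (e : String) (ht : t.contains e = true) :
    t.get? e = some (t.getD e 0) := by
  rw [PySem.Dict.contains_eq_isSome_get?] at ht
  cases hg : t.get? e with
  | none => rw [hg] at ht; simp at ht
  | some n => rw [PySem.Dict.getD_eq_get?_getD, hg]; rfl

-- inserting the merged inner dict commutes with merging after inserting the count
lemma pvInsert_merge (t c c' : PySem.Dict String Int) (e : String) (v : Int)
    (hcc : ∀ k, k ≠ e → c.getD k 0 = c'.getD k 0) :
    (pvMerge t c).insert e (PySem.Dict.mk [("count", v), ("critical", c'.getD e 0)]) =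
      pvMerge (t.insert e v) c' := by
  simp only [PySem.Dict.insert, pvContains_merge]
  by_cases ht : t.contains e = true
  · simp only [ht, if_pos, pvMerge, List.map_map]
    congr 1
    apply List.map_congr_left
    intro p _
    by_cases hp : p.1 = e
    · simp [Function.comp, hp]
    · simp [Function.comp, hp, hcc p.1 hp]
  · have ht' : t.contains e = false := by simpa using ht
    simp only [ht', Bool.false_eq_true, if_neg, not_false_iff, pvMerge,
      List.map_append, List.map_map, List.map_cons, List.map_nil]
    congr 2
    apply List.map_congr_left
    intro p hp
    have hpe : p.1 ≠ e := by
      intro hcontra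
      have hmem : t.contains e = true := by
        simp only [PySem.Dict.contains, List.any_eq_true]
        exact ⟨p, hp, by simp [hcontra]⟩
      rw [hmem] at ht'; exact absurd ht' (by simp)
    simp [hcc p.1 hpe]

-- one step of A's loop, in terms of one step of each of B's two tallies
lemma pvStep_merge (t c : PySem.Dict String Int) (cfg : List (String × String))
    (h : ∀ k, t.contains k = false → c.getD k 0 = 0) :
    pvAStep (pvMerge t c) cfg = pvMerge (pvTotalStep t cfg) (pvCritStep c cfg) := by
  simp only [pvAStep, pvTotalStep, pvCritStep, pvContains_merge]
  set e := (cfg.lookup "environment").getD "unknown" with he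
  by_cases ht : t.contains e = true
  · have hg := pvGet?_of_contains t e ht
    simp only [ht, if_pos, PySem.Dict.modify, pvGetD_merge t c e _ hg, pvInner_count]
    by_cases hb : (cfg.lookup "risk_level" == some "CRITICAL") = true
    · simp only [hb, if_pos, PySem.Dict.getD_insert_self, pvInner_crit,
        PySem.Dict.insert_insert_self]
      have key := pvInsert_merge t c (c.insert e (c.getD e 0 + 1)) e (t.getD e 0 + 1)
        (fun k hk => (PySem.Dict.getD_insert_of_ne c (c.getD e 0 + 1) 0 hk).symm)
      rw [PySem.Dict.getD_insert_self] at key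
      exact key
    · have hb' : (cfg.lookup "risk_level" == some "CRITICAL") = false := by simpa using hb
      simp only [hb', Bool.false_eq_true, if_neg, not_false_iff]
      exact pvInsert_merge t c c e (t.getD e 0 + 1) (fun _ _ => rfl)
  · have ht' : t.contains e = false := by simpa using ht
    have hce : c.getD e 0 = 0 := h e ht'
    have hte : t.getD e 0 = 0 := PySem.Dict.getD_of_not_contains t 0 ht'
    have hz : (PySem.Dict.mk [("count", (0 : Int)), ("critical", (0 : Int))])
        = PySem.Dict.mk [("count", (0 : Int)), ("critical", c.getD e 0)] := by rw [hce]
    have hg1 : (pvMerge t c).insert e (PySem.Dict.mk [("count", 0), ("critical", 0)])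
        = pvMerge (t.insert e 0) c := by
      rw [hz]; exact pvInsert_merge t c c e 0 (fun _ _ => rfl)
    have hg2 : (t.insert e 0).get? e = some 0 := PySem.Dict.get?_insert_self t e 0
    simp only [ht', Bool.false_eq_true, if_neg, not_false_iff, hg1, PySem.Dict.modify,
      pvGetD_merge (t.insert e 0) c e 0 hg2, hce, pvInner_count, zero_add]
    by_cases hb : (cfg.lookup "risk_level" == some "CRITICAL") = true
    · simp only [hb, if_pos, PySem.Dict.getD_insert_self, pvInner_crit, zero_add,
        PySem.Dict.insert_insert_self]
      have key := pvInsert_merge (t.insert e 0) c (c.insert e (c.getD e 0 + 1)) e 1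
        (fun k hk => (PySem.Dict.getD_insert_of_ne c (c.getD e 0 + 1) 0 hk).symm)
      rw [PySem.Dict.getD_insert_self, hce, zero_add, PySem.Dict.insert_insert_self] at key
      rw [key, hte, zero_add]
    · have hb' : (cfg.lookup "risk_level" == some "CRITICAL") = false := by simpa using hb
      have hone : (PySem.Dict.mk [("count", (1 : Int)), ("critical", (0 : Int))])
          = PySem.Dict.mk [("count", (1 : Int)), ("critical", c.getD e 0)] := by rw [hce]
      simp only [hb', Bool.false_eq_true, if_neg, not_false_iff]
      rw [hone, pvInsert_merge (t.insert e 0) c c e 1 (fun _ _ => rfl),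
        PySem.Dict.insert_insert_self, hte, zero_add]

lemma pvInv_step (t c : PySem.Dict String Int) (cfg : List (String × String))
    (h : ∀ k, t.contains k = false → c.getD k 0 = 0) :
    ∀ k, (pvTotalStep t cfg).contains k = false → (pvCritStep c cfg).getD k 0 = 0 := by
  intro k hk
  simp only [pvTotalStep, PySem.Dict.contains_insert, Bool.or_eq_false_iff] at hk
  obtain ⟨hk1, hk2⟩ := hk
  have hke : k ≠ (cfg.lookup "environment").getD "unknown" := by
    intro hcontra; rw [hcontra] at hk1; simp at hk1
  simp only [pvCritStep]
  by_cases hb : (cfg.lookup "risk_level" == some "CRITICAL") = true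
  · simp only [hb, if_pos, PySem.Dict.getD_insert_of_ne _ _ _ hke]
    exact h k hk2
  · have hb' : (cfg.lookup "risk_level" == some "CRITICAL") = false := by simpa using hb
    simp only [hb', Bool.false_eq_true, if_neg, not_false_iff]
    exact h k hk2

lemma pvFold_merge (configs : List (List (String × String))) :
    ∀ (t c : PySem.Dict String Int), (∀ k, t.contains k = false → c.getD k 0 = 0) →
      configs.foldl pvAStep (pvMerge t c) =
        pvMerge (configs.foldl pvTotalStep t) (configs.foldl pvCritStep c) := by
  induction configs with
  | nil => intro t c _; rfl
  | cons cfg rest ih =>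
    intro t c h
    simp only [List.foldl_cons, pvStep_merge t c cfg h]
    exact ih _ _ (pvInv_step t c cfg h)

-- ===== VERDICT (by name: the statement is the Claim_ definition above) =====
theorem group_by_environment_py_spec : Claim_equal_group_by_environment_py := by
  intro configs _
  unfold Spec_group_by_environment_py group_by_environment_py group_by_environment_py_alt
  have h0 : ∀ k, (PySem.Dict.mk ([] : List (String × Int))).contains k = false →
      (PySem.Dict.mk ([] : List (String × Int))).getD k 0 = 0 := by
    intro k _; rfl
  have hmerge : (PySem.Dict.mk ([] : List (String × (PySem.Dict String Int)))) =
      pvMerge (PySem.Dict.mk []) (PySem.Dict.mk []) := rfl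
  rw [hmerge, pvFold_merge configs _ _ h0]
  simp [pvMerge, List.map_map]
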